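-- pv_equiv track=rewrite | github.com/frank2889/emmso-shopify-theme | AI/captain.py | _generate_execution_sequence
-- ===== SOURCE A (Python) =====
-- from typing import Dict, List, Any
--
-- def _generate_execution_sequence(target_files: List[Dict]) -> List[str]:
--     """Generate ordered execution sequence for Captain deployment"""
--     sequence = []
--
--     # Sort by priority first
--     high_priority = [f for f in target_files if f.get('priority') == 'HIGH']
--     medium_priority = [f for f in target_files if f.get('priority') == 'MEDIUM']
--     low_priority = [f for f in target_files if f.get('priority') == 'LOW']
--
--     # Generate execution steps
--     step = 1
--     for file_group, priority_name in [(high_priority, 'HIGH'), (medium_priority, 'MEDIUM'), (low_priority, 'LOW')]: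
--         for file_info in file_group:
--             sequence.append(f"Step {step} ({priority_name}): {file_info.get('file', 'unknown')} - {file_info.get('action', 'no action specified')}")
--             step += 1
--
--     return sequence
-- ===== SOURCE B (Python) =====
-- def _generate_execution_sequence(target_files):
--     """Generate ordered execution sequence for Captain deployment"""
--     ranked = []
--     for file_info in target_files:
--         priority = file_info.get('priority')
--         if priority == 'HIGH':
--             ranked.append((0, file_info))
--         elif priority == 'MEDIUM':
--             ranked.append((1, file_info))
--         elif priority == 'LOW':
--             ranked.append((2, file_info))
--     ranked.sort(key=lambda entry: entry[0])
--     names = ('HIGH', 'MEDIUM', 'LOW')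
--     return [
--         f"Step {step} ({names[rank]}): {file_info.get('file', 'unknown')} - {file_info.get('action', 'no action specified')}"
--         for step, (rank, file_info) in enumerate(ranked, 1)
--     ]
-- ===== Notes on version B (the rewrite author's own statement) =====
-- stated objective: alternative
-- what changed: Replaces three separate priority-filter passes plus a nested counter loop by a single rank-assigning pass, one stable sort by rank, and one enumerate pass that formats the steps.
import Mathlib
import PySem

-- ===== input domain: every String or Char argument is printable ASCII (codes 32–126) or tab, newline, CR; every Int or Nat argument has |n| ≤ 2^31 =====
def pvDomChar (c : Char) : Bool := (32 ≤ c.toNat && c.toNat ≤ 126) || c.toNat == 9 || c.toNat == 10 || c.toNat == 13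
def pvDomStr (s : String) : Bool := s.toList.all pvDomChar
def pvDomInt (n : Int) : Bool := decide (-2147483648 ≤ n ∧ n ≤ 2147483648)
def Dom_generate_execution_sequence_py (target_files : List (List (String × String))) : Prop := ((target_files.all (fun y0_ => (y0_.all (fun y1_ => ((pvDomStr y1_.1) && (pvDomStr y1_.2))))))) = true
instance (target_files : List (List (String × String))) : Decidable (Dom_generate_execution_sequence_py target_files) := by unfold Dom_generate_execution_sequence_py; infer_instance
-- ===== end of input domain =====

-- B replaces A's three priority-filter passes and nested counter loop by one rank-assigning
-- pass, a stable sort by rank, and one enumerate pass (objective: alternative decomposition).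

-- shared f-string body: "Step {step} ({priority}): {file or 'unknown'} - {action or 'no action specified'}"
def pvStep (n : Int) (p : String) (f : List (String × String)) : String :=
  "Step " ++ PySem.Int.toStr n ++ " (" ++ p ++ "): " ++
    PySem.Dict.getD (PySem.Dict.mk f) "file" "unknown" ++ " - " ++
    PySem.Dict.getD (PySem.Dict.mk f) "action" "no action specified"

-- ===== PORT A =====
def generate_execution_sequence_py (target_files : List (List (String × String))) : List String :=
  let high_priority := target_files.filter (fun f => PySem.Dict.get? (PySem.Dict.mk f) "priority" == some "HIGH")
  let medium_priority := target_files.filter (fun f => PySem.Dict.get? (PySem.Dict.mk f) "priority" == some "MEDIUM")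
  let low_priority := target_files.filter (fun f => PySem.Dict.get? (PySem.Dict.mk f) "priority" == some "LOW")
  let res := [(high_priority, "HIGH"), (medium_priority, "MEDIUM"), (low_priority, "LOW")].foldl
    (fun (st : List String × Int) gp =>
      gp.1.foldl (fun (st : List String × Int) file_info =>
        (st.1 ++ [pvStep st.2 gp.2 file_info], st.2 + 1)) st)
    ([], 1)
  res.1

-- ===== PORT B =====
-- the loop body: rank a file by its priority, dropping unranked ones
def pvRank (f : List (String × String)) : Option (Int × List (String × String)) :=
  if PySem.Dict.get? (PySem.Dict.mk f) "priority" == some "HIGH" then some (0, f)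
  else if PySem.Dict.get? (PySem.Dict.mk f) "priority" == some "MEDIUM" then some (1, f)
  else if PySem.Dict.get? (PySem.Dict.mk f) "priority" == some "LOW" then some (2, f)
  else none

def generate_execution_sequence_py_alt (target_files : List (List (String × String))) : List String :=
  let ranked := target_files.filterMap pvRank
  let sortedRanked := PySem.List.sorted ranked (fun entry => entry.1) false
  let names : List String := ["HIGH", "MEDIUM", "LOW"]
  (PySem.List.enumerate sortedRanked 1).map
    (fun t => pvStep t.1 (PySem.List.pyGetD names t.2.1 "") t.2.2)

-- ===== PRECONDITION & SPEC =====
def Spec_generate_execution_sequence_py (target_files : List (List (String × String))) (out : List String) : Prop := out = generate_execution_sequence_py_alt target_files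
instance (target_files : List (List (String × String))) (out : List String) : Decidable (Spec_generate_execution_sequence_py target_files out) := by unfold Spec_generate_execution_sequence_py; infer_instance

-- ===== CLAIM (what is proved, stated in full; the proofs are below) =====
def Claim_equal_generate_execution_sequence_py : Prop := ∀ (target_files : List (List (String × String))), Dom_generate_execution_sequence_py target_files → Spec_generate_execution_sequence_py target_files (generate_execution_sequence_py target_files)

-- ===== LEMMAS AND PROOFS =====

-- insertBy places x after a prefix it does not go before and before a suffix it goes before
theorem pv_insertBy_mid {α : Type} (before : α → α → Bool) (x : α) (u v : List α)
    (hu : ∀ y ∈ u, before x y = false) (hv : ∀ y ∈ v, before x y = true) :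
    PySem.List.insertBy before x (u ++ v) = u ++ x :: v := by
  induction u with
  | nil =>
    cases v with
    | nil => rfl
    | cons y ys => simp [PySem.List.insertBy, hv y (by simp)]
  | cons a u ih =>
    simp [PySem.List.insertBy, hu a (by simp)]
    exact ih (fun y hy => hu y (by simp [hy]))

-- insertion-sorting a list whose keys are 0/1/2 onto a partitioned accumulator partitions it
theorem pv_sort_partition {α : Type} (l : List (Int × α))
    (hl : ∀ t ∈ l, t.1 = 0 ∨ t.1 = 1 ∨ t.1 = 2) :
    ∀ (P0 P1 P2 : List (Int × α)),
      (∀ t ∈ P0, t.1 = 0) → (∀ t ∈ P1, t.1 = 1) → (∀ t ∈ P2, t.1 = 2) →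
      l.foldl (fun acc x => PySem.List.insertBy (fun a b => decide (a.1 < b.1)) x acc)
          (P0 ++ P1 ++ P2)
        = (P0 ++ l.filter (fun t => t.1 == 0)) ++ (P1 ++ l.filter (fun t => t.1 == 1))
            ++ (P2 ++ l.filter (fun t => t.1 == 2)) := by
  induction l with
  | nil => intro P0 P1 P2 _ _ _; simp
  | cons x l ih =>
    intro P0 P1 P2 h0 h1 h2
    have hx := hl x (by simp)
    have hl' : ∀ t ∈ l, t.1 = 0 ∨ t.1 = 1 ∨ t.1 = 2 := fun t ht => hl t (by simp [ht])
    rcases hx with hx | hx | hx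
    · have : PySem.List.insertBy (fun a b => decide (a.1 < b.1)) x (P0 ++ P1 ++ P2)
          = (P0 ++ [x]) ++ P1 ++ P2 := by
        rw [List.append_assoc, pv_insertBy_mid _ _ P0 (P1 ++ P2)
          (fun y hy => by simp [h0 y hy, hx])
          (fun y hy => by
            rcases List.mem_append.1 hy with h | h
            · simp [h1 y h, hx]
            · simp [h2 y h, hx])]
        simp
      rw [List.foldl_cons, this,
        ih hl' (P0 ++ [x]) P1 P2
          (fun t ht => by rcases List.mem_append.1 ht with h | h
                          · exact h0 t h
                          · simp at h; simp [h, hx]) h1 h2]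
      simp [hx]
    · have : PySem.List.insertBy (fun a b => decide (a.1 < b.1)) x (P0 ++ P1 ++ P2)
          = P0 ++ (P1 ++ [x]) ++ P2 := by
        rw [pv_insertBy_mid _ _ (P0 ++ P1) P2
          (fun y hy => by
            rcases List.mem_append.1 hy with h | h
            · simp [h0 y h, hx]
            · simp [h1 y h, hx])
          (fun y hy => by simp [h2 y hy, hx])]
        simp
      rw [List.foldl_cons, this,
        ih hl' P0 (P1 ++ [x]) P2 h0
          (fun t ht => by rcases List.mem_append.1 ht with h | h
                          · exact h1 t h
                          · simp at h; simp [h, hx]) h2]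
      simp [hx]
    · have : PySem.List.insertBy (fun a b => decide (a.1 < b.1)) x (P0 ++ P1 ++ P2)
          = P0 ++ P1 ++ (P2 ++ [x]) := by
        rw [PySem.List.insertBy_of_forall_not_before _ _ _
          (fun y hy => by
            rcases List.mem_append.1 hy with h | h
            · rcases List.mem_append.1 h with h' | h'
              · simp [h0 y h', hx]
              · simp [h1 y h', hx]
            · simp [h2 y h, hx])]
        simp
      rw [List.foldl_cons, this,
        ih hl' P0 P1 (P2 ++ [x]) h0 h1
          (fun t ht => by rcases List.mem_append.1 ht with h | h
                          · exact h2 t h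
                          · simp at h; simp [h, hx])]
      simp [hx]

theorem pv_rank_keys (tfs : List (List (String × String))) :
    ∀ t ∈ tfs.filterMap pvRank, t.1 = 0 ∨ t.1 = 1 ∨ t.1 = 2 := by
  intro t ht
  rcases List.mem_filterMap.1 ht with ⟨f, _, hf⟩
  unfold pvRank at hf
  split_ifs at hf <;> (try cases hf) <;> simp_all

-- the rank-r slice of the ranked list is A's priority filter, tagged with r
theorem pv_filter_rank (tfs : List (List (String × String))) :
    ((tfs.filterMap pvRank).filter (fun t => t.1 == 0)
        = (tfs.filter (fun f => PySem.Dict.get? (PySem.Dict.mk f) "priority" == some "HIGH")).map (fun f => ((0 : Int), f)))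
    ∧ ((tfs.filterMap pvRank).filter (fun t => t.1 == 1)
        = (tfs.filter (fun f => PySem.Dict.get? (PySem.Dict.mk f) "priority" == some "MEDIUM")).map (fun f => ((1 : Int), f)))
    ∧ ((tfs.filterMap pvRank).filter (fun t => t.1 == 2)
        = (tfs.filter (fun f => PySem.Dict.get? (PySem.Dict.mk f) "priority" == some "LOW")).map (fun f => ((2 : Int), f))) := by
  induction tfs with
  | nil => simp
  | cons f tfs ih =>
    obtain ⟨ih0, ih1, ih2⟩ := ih
    unfold pvRank
    simp only [List.filterMap_cons, List.filter_cons]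
    split_ifs with h1 h2 h3 <;>
      simp_all [pvRank]

theorem pv_enum_append {α : Type} (u v : List α) (s : Int) :
    PySem.List.enumerate (u ++ v) s
      = PySem.List.enumerate u s ++ PySem.List.enumerate v (s + u.length) := by
  induction u generalizing s with
  | nil => simp [PySem.List.enumerate_nil]
  | cons a u ih =>
    simp [PySem.List.enumerate_cons, ih, add_assoc]
    ring_nf

theorem pv_enum_map {α β : Type} (f : α → β) (u : List α) (s : Int) :
    PySem.List.enumerate (u.map f) s
      = (PySem.List.enumerate u s).map (fun t => (t.1, f t.2)) := by
  induction u generalizing s with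
  | nil => rfl
  | cons a u ih => simp [PySem.List.enumerate_cons, ih]

-- A's inner loop: an append-with-counter fold is an enumerate-and-map
theorem pv_inner_fold (g : List (List (String × String))) (p : String) :
    ∀ (acc : List String) (s : Int),
      g.foldl (fun (st : List String × Int) file_info =>
          (st.1 ++ [pvStep st.2 p file_info], st.2 + 1)) (acc, s)
        = (acc ++ (PySem.List.enumerate g s).map (fun t => pvStep t.1 p t.2), s + g.length) := by
  induction g with
  | nil => intro acc s; simp [PySem.List.enumerate_nil]
  | cons a g ih =>
    intro acc s
    simp [PySem.List.enumerate_cons, ih, add_assoc]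
    ring_nf

-- ===== VERDICT (by name: the statement is the Claim_ definition above) =====
theorem generate_execution_sequence_py_spec : Claim_equal_generate_execution_sequence_py := by
  intro tfs _
  unfold Spec_generate_execution_sequence_py
  unfold generate_execution_sequence_py generate_execution_sequence_py_alt
  dsimp only
  obtain ⟨h0, h1, h2⟩ := pv_filter_rank tfs
  have hsort : PySem.List.sorted (tfs.filterMap pvRank) (fun entry => entry.1) false
      = (tfs.filterMap pvRank).filter (fun t => t.1 == 0)
        ++ (tfs.filterMap pvRank).filter (fun t => t.1 == 1)
        ++ (tfs.filterMap pvRank).filter (fun t => t.1 == 2) := by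
    rw [PySem.List.sorted_eq_foldl_insertBy]
    have := pv_sort_partition (tfs.filterMap pvRank) (pv_rank_keys tfs) [] [] []
      (by simp) (by simp) (by simp)
    simpa using this
  rw [hsort, h0, h1, h2]
  simp only [List.foldl_cons, List.foldl_nil, pv_inner_fold]
  rw [pv_enum_append, pv_enum_append, pv_enum_map, pv_enum_map, pv_enum_map]
  have e0 : PySem.List.pyGetD (["HIGH", "MEDIUM", "LOW"] : List String) (0 : Int) "" = "HIGH" := rfl
  have e1 : PySem.List.pyGetD (["HIGH", "MEDIUM", "LOW"] : List String) (1 : Int) "" = "MEDIUM" := rfl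
  have e2 : PySem.List.pyGetD (["HIGH", "MEDIUM", "LOW"] : List String) (2 : Int) "" = "LOW" := rfl
  simp [List.map_map, Function.comp_def, e0, e1, e2, add_assoc]
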